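-- pv_equiv track=rewrite | github.com/f6j9yswtpk-maker/Ryu_bots | main.py | _dalembert_unit_from_outcomes
-- ===== SOURCE A (Python) =====
-- def _dalembert_unit_from_outcomes(
--     outcomes: list[str],
--     our_side: str = "Yes",
--     max_cap: int = 12,
-- ) -> int:
--     unit = 1
--     for outcome in reversed(outcomes):
--         if outcome == our_side:
--             unit = max(1, unit - 1)
--         else:
--             unit += 1
--     return min(unit, max_cap)
-- ===== SOURCE B (Python) =====
-- def _dalembert_unit_from_outcomes(
--     outcomes: list[str],
--     our_side: str = "Yes",
--     max_cap: int = 12,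
-- ) -> int:
--     # Lindley identity: the reflecting-barrier unit equals 1 + s - min prefix sum.
--     s = 0
--     low = 0
--     for outcome in reversed(outcomes):
--         s += -1 if outcome == our_side else 1
--         if s < low:
--             low = s
--     return min(1 + s - low, max_cap)
-- ===== Notes on version B (the rewrite author's own statement) =====
-- stated objective: alternative
-- what changed: Replaces the per-step max(1, unit-1) clamp with an unclamped prefix-sum walk plus running-minimum tracking, recovering the reflected unit by the Lindley identity 1 + s - low.
import Mathlib
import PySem

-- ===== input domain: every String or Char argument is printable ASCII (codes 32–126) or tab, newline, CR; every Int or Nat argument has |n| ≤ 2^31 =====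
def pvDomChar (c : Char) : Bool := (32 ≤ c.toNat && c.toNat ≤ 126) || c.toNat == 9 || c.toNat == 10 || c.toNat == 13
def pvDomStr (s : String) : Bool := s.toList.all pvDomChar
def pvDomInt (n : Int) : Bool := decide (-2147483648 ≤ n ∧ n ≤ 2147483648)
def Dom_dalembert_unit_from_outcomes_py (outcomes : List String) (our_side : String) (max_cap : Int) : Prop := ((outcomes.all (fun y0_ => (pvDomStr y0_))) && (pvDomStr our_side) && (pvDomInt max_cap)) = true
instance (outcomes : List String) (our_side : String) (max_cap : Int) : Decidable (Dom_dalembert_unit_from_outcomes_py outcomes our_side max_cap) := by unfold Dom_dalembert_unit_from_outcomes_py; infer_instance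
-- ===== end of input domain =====

-- B replaces A's per-step clamped d'Alembert update with an unclamped prefix-sum walk plus running minimum (Lindley identity); objective: alternative, same cost.


-- ===== PORT A =====
-- Port of A: fold over reversed outcomes with the clamped unit.
def dalembert_unit_from_outcomes_py (outcomes : List String) (our_side : String) (max_cap : Int) : Int :=
  let unit := outcomes.reverse.foldl
    (fun unit outcome => if outcome == our_side then max 1 (unit - 1) else unit + 1) 1
  min unit max_cap

-- ===== PORT B =====
-- Port of B: unclamped prefix-sum walk with running minimum; Lindley identity at the end.
def dalembert_unit_from_outcomes_py_alt (outcomes : List String) (our_side : String) (max_cap : Int) : Int :=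
  let p := outcomes.reverse.foldl
    (fun (p : Int × Int) outcome =>
      let s := p.1 + (if outcome == our_side then -1 else 1)
      (s, if s < p.2 then s else p.2)) ((0 : Int), (0 : Int))
  min (1 + p.1 - p.2) max_cap

-- ===== PRECONDITION & SPEC =====
def Spec_dalembert_unit_from_outcomes_py (outcomes : List String) (our_side : String) (max_cap : Int) (out : Int) : Prop := out = dalembert_unit_from_outcomes_py_alt outcomes our_side max_cap
instance (outcomes : List String) (our_side : String) (max_cap : Int) (out : Int) : Decidable (Spec_dalembert_unit_from_outcomes_py outcomes our_side max_cap out) := by unfold Spec_dalembert_unit_from_outcomes_py; infer_instance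

-- ===== CLAIM (what is proved, stated in full; the proofs are below) =====
def Claim_equal_dalembert_unit_from_outcomes_py : Prop := ∀ (outcomes : List String) (our_side : String) (max_cap : Int), Dom_dalembert_unit_from_outcomes_py outcomes our_side max_cap → Spec_dalembert_unit_from_outcomes_py outcomes our_side max_cap (dalembert_unit_from_outcomes_py outcomes our_side max_cap)

-- ===== LEMMAS AND PROOFS =====

-- ===== VERDICT (by name: the statement is the Claim_ definition above) =====
-- Loop invariant: A's clamped unit equals 1 + s - low for B's state (s, low), given low ≤ s.
theorem pv_loop_inv (side : String) (l : List String) (s low : Int) (h : low ≤ s) :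
    l.foldl (fun unit outcome => if outcome == side then max 1 (unit - 1) else unit + 1)
      (1 + s - low)
    = 1 + (l.foldl (fun (p : Int × Int) outcome =>
        let s := p.1 + (if outcome == side then -1 else 1)
        (s, if s < p.2 then s else p.2)) (s, low)).1
      - (l.foldl (fun (p : Int × Int) outcome =>
        let s := p.1 + (if outcome == side then -1 else 1)
        (s, if s < p.2 then s else p.2)) (s, low)).2 := by
  induction l generalizing s low with
  | nil => simp
  | cons x xs ih =>
    simp only [List.foldl_cons]
    by_cases hx : (x == side) = true
    · simp only [hx]
      have h1 : max 1 (1 + s - low - 1) = 1 + (s + -1) - (if s + -1 < low then s + -1 else low) := by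
        split_ifs with hc <;> omega
      rw [h1]
      exact ih (s + -1) _ (by split_ifs with hc <;> omega)
    · simp only [if_neg hx]
      have h2 : 1 + s - low + 1 = 1 + (s + 1) - (if s + 1 < low then s + 1 else low) := by
        split_ifs with hc <;> omega
      rw [h2]
      exact ih (s + 1) _ (by split_ifs with hc <;> omega)

theorem dalembert_unit_from_outcomes_py_spec : Claim_equal_dalembert_unit_from_outcomes_py := by
  intro outcomes our_side max_cap _
  unfold Spec_dalembert_unit_from_outcomes_py
  unfold dalembert_unit_from_outcomes_py dalembert_unit_from_outcomes_py_alt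
  have := pv_loop_inv our_side outcomes.reverse 0 0 le_rfl
  simp only [show (1:Int) + 0 - 0 = 1 by ring] at this
  rw [this]
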